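-- pv_equiv track=rewrite | github.com/panuozzo77/AdvancedProgramming | exercises/4_generators/intercorso1_2.py | sum_generator
-- ===== SOURCE A (Python) =====
-- def sum_generator(n, flag):
--     somma = 0
--     for i in range(n):
--         somma += i
--         if i < flag:
--             yield somma
--         else:
--             break
-- ===== SOURCE B (Python) =====
-- def sum_generator(n, flag):
--     # closed form: the i-th yielded value is the triangular number i*(i+1)//2;
--     # the loop stops at the first i >= flag, i.e. runs over range(min(n, flag))
--     for i in range(min(n, flag)):
--         yield i * (i + 1) // 2
-- ===== Notes on version B (the rewrite author's own statement) =====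
-- stated objective: simpler
-- what changed: Replaced the running-sum accumulator and explicit break with a direct closed-form yield of the i-th triangular number i*(i+1)//2 over the truncated range(min(n, flag)).
import Mathlib
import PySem

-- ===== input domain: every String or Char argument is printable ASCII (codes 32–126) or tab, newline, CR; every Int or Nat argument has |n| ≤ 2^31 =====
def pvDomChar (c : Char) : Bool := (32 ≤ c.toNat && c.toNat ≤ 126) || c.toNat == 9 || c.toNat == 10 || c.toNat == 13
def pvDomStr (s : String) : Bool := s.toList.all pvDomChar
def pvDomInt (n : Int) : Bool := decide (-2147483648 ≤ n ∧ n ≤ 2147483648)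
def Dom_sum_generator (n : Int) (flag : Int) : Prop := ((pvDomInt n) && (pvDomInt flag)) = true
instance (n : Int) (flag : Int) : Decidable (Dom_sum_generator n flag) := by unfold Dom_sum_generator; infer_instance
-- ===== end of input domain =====

-- B drops the running-sum accumulator and break: each yielded value is the closed-form
-- triangular number i*(i+1)//2, over range(min(n, flag)); objective: simpler.

-- ===== PORT A =====
-- loop 'for i in range(n): somma += i; if i < flag: yield somma else: break'
-- (range(n) is lazy in Python and the loop may break early, so the port counts
--  the remaining iterations with a fuel argument instead of building the list)
def pvGoA (flag : Int) : Nat → Int → Int → List Int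
  | 0, _, _ => []
  | fuel + 1, i, somma =>
      let s := somma + i
      if i < flag then s :: pvGoA flag fuel (i + 1) s else []

def sum_generator (n : Int) (flag : Int) : List Int :=
  pvGoA flag n.toNat 0 0

-- ===== PORT B =====
def sum_generator_alt (n : Int) (flag : Int) : List Int :=
  (PySem.List.pyRange 0 (min n flag) 1).map (fun i => PySem.Int.floordiv (i * (i + 1)) 2)

-- ===== PRECONDITION & SPEC =====
def Spec_sum_generator (n : Int) (flag : Int) (out : List Int) : Prop := out = sum_generator_alt n flag
instance (n : Int) (flag : Int) (out : List Int) : Decidable (Spec_sum_generator n flag out) := by unfold Spec_sum_generator; infer_instance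

-- ===== CLAIM (what is proved, stated in full; the proofs are below) =====
def Claim_equal_sum_generator : Prop := ∀ (n : Int) (flag : Int), Dom_sum_generator n flag → Spec_sum_generator n flag (sum_generator n flag)

-- ===== LEMMAS AND PROOFS =====

lemma pv_tri (a s : Int) (h : 2 * s = a * (a - 1)) :
    s + a = PySem.Int.floordiv (a * (a + 1)) 2 := by
  rw [PySem.Int.floordiv_eq_ediv_of_pos (by omega : (0:Int) < 2)]
  have h2 : a * (a + 1) = 2 * (s + a) := by ring_nf; nlinarith [h]
  rw [h2]
  omega

lemma pvGoA_eq (flag : Int) : ∀ (fuel : Nat) (i s : Int), 2 * s = i * (i - 1) →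
    pvGoA flag fuel i s
      = (PySem.List.pyRange i (min (i + fuel) flag) 1).map (fun j => PySem.Int.floordiv (j * (j + 1)) 2) := by
  intro fuel
  induction fuel with
  | zero =>
      intro i s _
      rw [PySem.List.pyRange_one_eq_nil (by simp : min (i + (0:Nat)) flag ≤ i)]
      simp [pvGoA]
  | succ k ih =>
      intro i s hs
      simp only [pvGoA]
      by_cases hif : i < flag
      · have hmin : i < min (i + ((k:Int) + 1)) flag := by omega
        rw [if_pos hif]
        rw [show ((((k:Nat) + 1 : Nat) : Int)) = (k : Int) + 1 by push_cast; ring] at *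
        rw [PySem.List.pyRange_one_cons hmin]
        simp only [List.map_cons]
        have hstep : 2 * PySem.Int.floordiv (i * (i + 1)) 2 = (i + 1) * ((i + 1) - 1) := by
          rw [← pv_tri i s hs]; ring_nf; nlinarith [hs]
        rw [pv_tri i s hs]
        congr 1
        rw [ih (i + 1) _ hstep]
        congr 2
        omega
      · rw [if_neg hif,
            PySem.List.pyRange_one_eq_nil (by omega : min (i + (((k:Nat) + 1 : Nat) : Int)) flag ≤ i)]
        simp

-- ===== VERDICT (by name: the statement is the Claim_ definition above) =====
theorem sum_generator_spec : Claim_equal_sum_generator := by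
  intro n flag _
  unfold Spec_sum_generator sum_generator sum_generator_alt
  rw [pvGoA_eq flag n.toNat 0 0 (by ring)]
  by_cases hn : 0 < n
  · congr 2; omega
  · rw [PySem.List.pyRange_one_eq_nil (by omega : min ((0:Int) + n.toNat) flag ≤ 0),
        PySem.List.pyRange_one_eq_nil (by omega : min n flag ≤ 0)]
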